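-- pv_equiv track=rewrite | github.com/jpcardozx/arco-find | arco_core_engine.py | _generate_service_recommendation
-- ===== SOURCE A (Python) =====
-- from typing import Dict, List, Optional, Tuple
--
-- def _generate_service_recommendation(issues: List[str]) -> str:
--     """Generate specific service recommendation based on issues"""
--     if not issues:
--         return "Performance audit recommended"
--
--     if any('lcp' in issue.lower() for issue in issues):
--         return "Core Web Vitals optimization - 2 week sprint ($800-1200)"
--
--     if any('cls' in issue.lower() for issue in issues):
--         return "Layout stability fixes - 1 week sprint ($600-900)"
--
--     if any('call' in issue.lower() or 'contact' in issue.lower() for issue in issues):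
--         return "Conversion optimization - A/B testing sprint ($700-1000)"
--
--     return "Performance audit + optimization roadmap ($500-800)"
-- ===== SOURCE B (Python) =====
-- def _generate_service_recommendation(issues):
--     """Single pass: lowercase each issue once, record which categories match, then apply priority."""
--     if not issues:
--         return "Performance audit recommended"
--     has_lcp = has_cls = has_call = False
--     for issue in issues:
--         low = issue.lower()
--         if 'lcp' in low:
--             has_lcp = True
--         if 'cls' in low:
--             has_cls = True
--         if 'call' in low or 'contact' in low:
--             has_call = True
--     if has_lcp:
--         return "Core Web Vitals optimization - 2 week sprint ($800-1200)"
--     if has_cls: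
--         return "Layout stability fixes - 1 week sprint ($600-900)"
--     if has_call:
--         return "Conversion optimization - A/B testing sprint ($700-1000)"
--     return "Performance audit + optimization roadmap ($500-800)"
-- ===== Notes on version B (the rewrite author's own statement) =====
-- stated objective: faster
-- what changed: B replaces A's four separate short-circuiting any-scans (each re-lowercasing every issue) with one pass that lowercases each issue exactly once and maintains matched-category flags, then returns by fixed priority.
import Mathlib
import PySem

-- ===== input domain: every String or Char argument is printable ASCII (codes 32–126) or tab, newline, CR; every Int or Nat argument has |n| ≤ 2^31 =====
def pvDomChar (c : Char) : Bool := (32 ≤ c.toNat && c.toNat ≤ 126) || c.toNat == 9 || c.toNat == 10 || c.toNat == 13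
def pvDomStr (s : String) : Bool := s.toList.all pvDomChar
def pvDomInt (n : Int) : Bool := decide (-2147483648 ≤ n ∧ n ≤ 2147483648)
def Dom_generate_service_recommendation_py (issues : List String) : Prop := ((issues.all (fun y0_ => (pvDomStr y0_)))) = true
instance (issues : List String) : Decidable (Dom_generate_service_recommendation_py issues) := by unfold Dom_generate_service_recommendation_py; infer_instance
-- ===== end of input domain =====

-- B replaces A's four separate short-circuiting any-scans with one pass that lowercases each
-- issue once and maintains matched-category flags, then returns by fixed priority (same cost class).

-- ===== PORT A =====
def generate_service_recommendation_py (issues : List String) : String :=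
  if issues = [] then "Performance audit recommended"
  else if issues.any (fun issue => PySem.Str.isIn "lcp" (PySem.Str.lower issue)) then
    "Core Web Vitals optimization - 2 week sprint ($800-1200)"
  else if issues.any (fun issue => PySem.Str.isIn "cls" (PySem.Str.lower issue)) then
    "Layout stability fixes - 1 week sprint ($600-900)"
  else if issues.any (fun issue =>
      PySem.Str.isIn "call" (PySem.Str.lower issue) || PySem.Str.isIn "contact" (PySem.Str.lower issue)) then
    "Conversion optimization - A/B testing sprint ($700-1000)"
  else "Performance audit + optimization roadmap ($500-800)"

-- ===== PORT B =====
-- loop body of B's single pass: lowercase once, update the three category flags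
def gsrStep (st : Bool × Bool × Bool) (issue : String) : Bool × Bool × Bool :=
  let low := PySem.Str.lower issue
  ( (if PySem.Str.isIn "lcp" low then true else st.1),
    (if PySem.Str.isIn "cls" low then true else st.2.1),
    (if PySem.Str.isIn "call" low || PySem.Str.isIn "contact" low then true else st.2.2) )

def generate_service_recommendation_py_alt (issues : List String) : String :=
  if issues = [] then "Performance audit recommended"
  else
    let st := issues.foldl gsrStep (false, false, false)
    if st.1 then "Core Web Vitals optimization - 2 week sprint ($800-1200)"
    else if st.2.1 then "Layout stability fixes - 1 week sprint ($600-900)"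
    else if st.2.2 then "Conversion optimization - A/B testing sprint ($700-1000)"
    else "Performance audit + optimization roadmap ($500-800)"

-- ===== PRECONDITION & SPEC =====
def Spec_generate_service_recommendation_py (issues : List String) (out : String) : Prop := out = generate_service_recommendation_py_alt issues
instance (issues : List String) (out : String) : Decidable (Spec_generate_service_recommendation_py issues out) := by unfold Spec_generate_service_recommendation_py; infer_instance

-- ===== CLAIM (what is proved, stated in full; the proofs are below) =====
def Claim_equal_generate_service_recommendation_py : Prop := ∀ (issues : List String), Dom_generate_service_recommendation_py issues → Spec_generate_service_recommendation_py issues (generate_service_recommendation_py issues)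

-- ===== LEMMAS AND PROOFS =====

-- the fold computes exactly the three 'any' scans
theorem gsrStep_foldl (l : List String) (a b c : Bool) :
    l.foldl gsrStep (a, b, c) =
      ( a || l.any (fun issue => PySem.Str.isIn "lcp" (PySem.Str.lower issue)),
        b || l.any (fun issue => PySem.Str.isIn "cls" (PySem.Str.lower issue)),
        c || l.any (fun issue =>
          PySem.Str.isIn "call" (PySem.Str.lower issue) || PySem.Str.isIn "contact" (PySem.Str.lower issue)) ) := by
  induction l generalizing a b c with
  | nil => simp
  | cons x xs ih =>
    simp only [List.foldl_cons, List.any_cons, gsrStep]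
    rw [ih]
    cases hx : PySem.Str.isIn "lcp" (PySem.Str.lower x) <;>
    cases hy : PySem.Str.isIn "cls" (PySem.Str.lower x) <;>
    cases hz : PySem.Str.isIn "call" (PySem.Str.lower x) || PySem.Str.isIn "contact" (PySem.Str.lower x) <;>
      simp

-- ===== VERDICT (by name: the statement is the Claim_ definition above) =====
theorem generate_service_recommendation_py_spec : Claim_equal_generate_service_recommendation_py := by
  intro issues _
  unfold Spec_generate_service_recommendation_py generate_service_recommendation_py generate_service_recommendation_py_alt
  by_cases h : issues = []
  · simp [h]
  · simp only [h, if_false, gsrStep_foldl, Bool.false_or]
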